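-- pv_equiv track=rewrite | github.com/parhambz/taylorLaurentSeries | main.py | laurent
-- ===== SOURCE A (Python) =====
-- def laurent(a, root, n):
--     # laurent series for a/(z-root)
--     res = [[0, 1] for i in range(n)]
--     for i in range(0, len(res)):
--         for j in range(0, i):
--             res[i][0] += -1
--             res[i][1] *= root
--         res[i][0] += -1
--         res[i][1] *= a
--     return res
-- ===== SOURCE B (Python) =====
-- def laurent(a, root, n):
--     # laurent series for a/(z-root): coefficient of (z-root)^{-i-1} is a*root^i
--     res = []
--     p = a
--     for i in range(n):
--         res.append([-i - 1, p])
--         p *= root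
--     return res
-- ===== Notes on version B (the rewrite author's own statement) =====
-- stated objective: faster
-- what changed: Replaced the quadratic double loop (i inner multiplications per row) by a single pass that maintains the running power a*root^i incrementally, appending [-i-1, a*root^i] directly.
import Mathlib
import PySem

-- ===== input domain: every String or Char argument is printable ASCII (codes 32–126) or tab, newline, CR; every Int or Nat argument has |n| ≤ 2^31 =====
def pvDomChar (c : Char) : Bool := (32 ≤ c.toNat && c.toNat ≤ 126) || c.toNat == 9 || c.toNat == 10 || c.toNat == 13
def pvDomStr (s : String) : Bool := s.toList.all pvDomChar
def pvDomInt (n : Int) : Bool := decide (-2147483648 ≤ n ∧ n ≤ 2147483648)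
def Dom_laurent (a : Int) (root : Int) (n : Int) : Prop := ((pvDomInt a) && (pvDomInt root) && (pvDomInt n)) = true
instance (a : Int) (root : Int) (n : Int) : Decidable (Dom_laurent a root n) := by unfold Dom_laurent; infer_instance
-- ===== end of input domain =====

-- B replaces A's quadratic double loop by one pass keeping the running power a*root^i (asymptotically faster).

-- ===== PORT A =====
-- res = [[0, 1] for i in range(n)]; nested loops mutate res[i] in place (here: functional cell update + set)
def laurent (a : Int) (root : Int) (n : Int) : List (List Int) :=
  let res : List (List Int) := (PySem.List.pyRange 0 n 1).map (fun _ => [0, 1])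
  -- for i in range(0, len(res)): bounds are the Nat indices 0..len-1, so List.range res.length
  (List.range res.length).foldl
    (fun res i =>
      -- for j in range(0, i): res[i][0] += -1; res[i][1] *= root
      let cell := (List.range i).foldl
        (fun c _ => [c.getD 0 0 - 1, c.getD 1 0 * root]) (res.getD i [])
      -- res[i][0] += -1; res[i][1] *= a
      res.set i [cell.getD 0 0 - 1, cell.getD 1 0 * a])
    res

-- ===== PORT B =====
-- single pass: append [-i-1, p] and update the running power p
def laurent_alt (a : Int) (root : Int) (n : Int) : List (List Int) :=
  ((PySem.List.pyRange 0 n 1).foldl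
    (fun (st : List (List Int) × Int) i => (st.1 ++ [[-i - 1, st.2]], st.2 * root))
    ([], a)).1

-- ===== PRECONDITION & SPEC =====
def Spec_laurent (a : Int) (root : Int) (n : Int) (out : List (List Int)) : Prop := out = laurent_alt a root n
instance (a : Int) (root : Int) (n : Int) (out : List (List Int)) : Decidable (Spec_laurent a root n out) := by unfold Spec_laurent; infer_instance

-- ===== CLAIM (what is proved, stated in full; the proofs are below) =====
def Claim_equal_laurent : Prop := ∀ (a : Int) (root : Int) (n : Int), Dom_laurent a root n → Spec_laurent a root n (laurent a root n)

-- ===== LEMMAS AND PROOFS =====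

-- range(a, b) with a nonnegative Int bound, as Nat indices
theorem pyRange_zero_toNat (n : Int) :
    PySem.List.pyRange 0 n 1 = (List.range n.toNat).map (fun k : Nat => (k : Int)) := by
  by_cases h : 0 ≤ n
  · rw [← Int.toNat_of_nonneg h, PySem.List.pyRange_zero_natCast]
    simp [max_eq_left h]
  · have h1 : PySem.List.pyRange 0 n 1 = [] := by simp [PySem.List.pyRange]; omega
    have h2 : n.toNat = 0 := by omega
    simp [h1, h2]

-- A's inner loop on a two-element cell
theorem inner_loop (root x y : Int) (i : Nat) :
    (List.range i).foldl (fun c _ => [c.getD 0 0 - 1, c.getD 1 0 * root]) [x, y]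
      = [x - i, y * root ^ i] := by
  induction i with
  | zero => simp
  | succ i ih =>
    rw [List.range_succ, List.foldl_append, ih]
    simp [List.getD]
    constructor
    · ring
    · ring

-- A's outer loop: setting each index of a constant list to a value of that index
theorem foldl_set_range' (f : Nat → List Int → List Int) (c : List Int) (m k : Nat) :
    (List.range' k m).foldl (fun r i => r.set i (f i (r.getD i [])))
        ((List.range k).map (fun j => f j c) ++ List.replicate m c)
      = (List.range (k + m)).map (fun j => f j c) := by
  induction m generalizing k with
  | zero => simp
  | succ m ih =>
    rw [List.range'_succ, List.foldl_cons]
    have hlen : ((List.range k).map (fun j => f j c)).length = k := by simp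
    have hget :
        (((List.range k).map (fun j => f j c) ++ List.replicate (m + 1) c)).getD k [] = c := by
      simp [List.getD, hlen]
    rw [hget]
    have hset :
        (((List.range k).map (fun j => f j c) ++ List.replicate (m + 1) c)).set k (f k c)
          = (List.range (k + 1)).map (fun j => f j c) ++ List.replicate m c := by
      simp [List.replicate_succ, List.range_succ]
    rw [hset, ih (k + 1), show k + (m + 1) = k + 1 + m from by omega]
-- A in closed form
theorem laurent_eq (a root n : Int) :
    laurent a root n = (List.range n.toNat).map (fun k : Nat => [-(k : Int) - 1, root ^ k * a]) := by
  unfold laurent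
  rw [pyRange_zero_toNat]
  simp only [List.map_map, List.length_map, List.length_range]
  have hrepl : (List.range n.toNat).map ((fun _ => ([0, 1] : List Int)) ∘ (fun k : Nat => (k : Int)))
      = List.replicate n.toNat [0, 1] := by
    simp [List.eq_replicate_iff]
  rw [hrepl]
  have := foldl_set_range'
    (fun i cell => [((List.range i).foldl (fun c _ => [c.getD 0 0 - 1, c.getD 1 0 * root]) cell).getD 0 0 - 1,
                    ((List.range i).foldl (fun c _ => [c.getD 0 0 - 1, c.getD 1 0 * root]) cell).getD 1 0 * a])
    [0, 1] n.toNat 0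
  simp only [List.range_eq_range', List.range'_zero, List.map_nil, List.nil_append, Nat.zero_add] at this ⊢
  rw [this]
  apply List.map_congr_left
  intro k _
  rw [← List.range_eq_range', inner_loop]
  simp [List.getD]

-- B in closed form (loop invariant for the running power)
theorem alt_loop (a root : Int) (m : Nat) :
    (((List.range m).map (fun k : Nat => (k : Int))).foldl
        (fun (st : List (List Int) × Int) i => (st.1 ++ [[-i - 1, st.2]], st.2 * root))
        ([], a))
      = ((List.range m).map (fun k : Nat => [-(k : Int) - 1, a * root ^ k]), a * root ^ m) := by
  induction m with
  | zero => simp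
  | succ m ih =>
    rw [List.range_succ, List.map_append, List.foldl_append, ih]
    simp [pow_succ, mul_assoc]

theorem laurent_alt_eq (a root n : Int) :
    laurent_alt a root n = (List.range n.toNat).map (fun k : Nat => [-(k : Int) - 1, a * root ^ k]) := by
  unfold laurent_alt
  rw [pyRange_zero_toNat, alt_loop]

-- ===== VERDICT (by name: the statement is the Claim_ definition above) =====
theorem laurent_spec : Claim_equal_laurent := by
  intro a root n _
  unfold Spec_laurent
  rw [laurent_eq, laurent_alt_eq]
  apply List.map_congr_left
  intro k _
  simp [mul_comm]
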